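-- pv_equiv track=rewrite | github.com/JuanIgnacioOchoa/Practice_Algorythms | Google/CodeJam2021/Moons and Umbrellas/main.py | jamal
-- ===== SOURCE A (Python) =====
-- def jamal(X, Y, S):
--     ans = 0
--     N = len(S)
--     i = 0
--     while i < N:
--         s = S[i]
--         if s == '?':
--             j = i
--             sj = S[j]
--             while sj == '?' and j < N - 1:
--
--                 j += 1
--                 sj = S[j]
--             if sj == '?' and j == N - 1 and i != j:
--                 pass
--             elif i != j:
--                 j -= 1
--
--
--             if i != 0 and j != N - 1:
--                 if S[i - 1] == S[j + 1]:
--                     pass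
--                 else:
--                     cost1 = None
--                     cost2 = None
--                     if S[i-1] == 'C':
--                         cost1 = X
--                     elif S[i - 1] == 'J':
--                         cost1 = Y
--                     if S[j + 1] == 'J':
--                         cost2 = X
--                     elif S[j + 1] == 'C':
--                         cost2 = Y
--                     ans += min(cost1, cost2)
--             i = j
--         elif i < N - 1:
--             if s == 'C' and S[i+1] == 'J':
--                 ans += X
--             elif s == 'J' and S[i+1] == 'C':
--                 ans += Y
--         i+=1
--     return ans
-- ===== SOURCE B (Python) =====
-- def jamal(X, Y, S):
--     # Drop every '?': boundary '?' are free and a '?' gap between letters a,b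
--     # costs exactly the a->b transition cost, so only adjacent kept letters matter.
--     t = [c for c in S if c != '?']
--     return sum(X if a == 'C' and b == 'J' else Y if a == 'J' and b == 'C' else 0
--                for a, b in zip(t, t[1:]))
-- ===== Notes on version B (the rewrite author's own statement) =====
-- stated objective: simpler
-- what changed: Replaces the index-juggling while-loop that scans '?'-runs and inspects their neighbours by a one-pass comprehension: drop every '?' and sum the transition costs of adjacent remaining letters (a '?' gap between a and b costs exactly the a->b transition cost, boundary '?' are free).
import Mathlib
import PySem

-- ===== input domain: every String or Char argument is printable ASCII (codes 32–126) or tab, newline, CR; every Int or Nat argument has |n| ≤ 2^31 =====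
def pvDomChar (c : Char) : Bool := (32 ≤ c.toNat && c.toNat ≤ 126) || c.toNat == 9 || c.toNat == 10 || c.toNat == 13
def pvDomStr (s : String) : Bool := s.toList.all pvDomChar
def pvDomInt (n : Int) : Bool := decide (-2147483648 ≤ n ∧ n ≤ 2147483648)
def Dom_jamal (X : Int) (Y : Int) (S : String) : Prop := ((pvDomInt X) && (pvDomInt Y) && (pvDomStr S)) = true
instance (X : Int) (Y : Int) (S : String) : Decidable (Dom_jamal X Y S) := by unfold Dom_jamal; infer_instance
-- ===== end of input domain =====

-- B replaces A's index-juggling '?'-run scan by one pass: drop all '?' and sum adjacent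
-- transition costs (simpler, same O(n)); Pre_jamal excludes exactly the inputs where A raises TypeError.


-- ===== PORT A =====
-- inner while loop: `while sj == '?' and j < N - 1: j += 1; sj = S[j]` (returns the final j)
def innerJ (l : List Char) (N : Nat) (j : Nat) : Nat :=
  if l.getD j ' ' = '?' ∧ j < N - 1 then innerJ l N (j + 1) else j
termination_by N - 1 - j
decreasing_by omega

-- innerJ only moves forward (needed for the outer loop's termination)
theorem innerJ_ge (l : List Char) (N : Nat) (j : Nat) : j ≤ innerJ l N j := by
  rw [innerJ]
  split
  · have := innerJ_ge l N (j + 1); omega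
  · exact Nat.le_refl j
termination_by N - 1 - j
decreasing_by omega

-- outer `while i < N` loop of A; all index accesses Python actually performs are in range
def loopA (X : Int) (Y : Int) (l : List Char) (N : Nat) (i : Nat) (ans : Int) : Int :=
  if _h : i < N then
    let s := l.getD i ' '
    if s = '?' then
      let j0 := innerJ l N i
      -- `if sj == '?' and j == N-1 and i != j: pass / elif i != j: j -= 1`
      let j := if l.getD j0 ' ' = '?' ∧ j0 = N - 1 ∧ i ≠ j0 then j0
               else if i ≠ j0 then j0 - 1 else j0
      let ans' :=
        if i ≠ 0 ∧ j ≠ N - 1 then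
          if l.getD (i - 1) ' ' = l.getD (j + 1) ' ' then ans
          else
            let cost1 : Option Int :=
              if l.getD (i - 1) ' ' = 'C' then some X
              else if l.getD (i - 1) ' ' = 'J' then some Y else none
            let cost2 : Option Int :=
              if l.getD (j + 1) ' ' = 'J' then some X
              else if l.getD (j + 1) ' ' = 'C' then some Y else none
            ans + (match cost1, cost2 with
                   | some u, some v => min u v
                   | _, _ => 0)   -- Python raises TypeError here (min with None); Pre_jamal excludes these inputs
        else ans
      loopA X Y l N (j + 1) ans'
    else
      let ans' :=
        if i < N - 1 then
          if s = 'C' ∧ l.getD (i + 1) ' ' = 'J' then ans + X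
          else if s = 'J' ∧ l.getD (i + 1) ' ' = 'C' then ans + Y
          else ans
        else ans
      loopA X Y l N (i + 1) ans'
  else ans
termination_by N - i
decreasing_by
  · have := innerJ_ge l N i
    split
    · omega
    · split <;> omega
  · omega

def jamal (X : Int) (Y : Int) (S : String) : Int :=
  loopA X Y S.toList S.toList.length 0 0

-- ===== PORT B =====
def pairCostB (X : Int) (Y : Int) (a : Char) (b : Char) : Int :=
  if a = 'C' ∧ b = 'J' then X else if a = 'J' ∧ b = 'C' then Y else 0

def jamal_alt (X : Int) (Y : Int) (S : String) : Int :=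
  let t := S.toList.filter (fun c => c != '?')
  (t.zip t.tail).foldl (fun acc p => acc + pairCostB X Y p.1 p.2) 0

-- ===== PRECONDITION & SPEC =====
-- Pre_jamal excludes exactly the inputs on which A raises TypeError: an interior maximal '?' run
-- whose two boundary characters differ and are not both 'C'/'J' (there A applies min to None).
def Pre_jamal (X : Int) (Y : Int) (S : String) : Prop :=
  ∀ p ∈ List.range S.toList.length, ∀ q ∈ List.range S.toList.length,
    p + 1 < q → S.toList.getD p ' ' ≠ '?' → S.toList.getD q ' ' ≠ '?' →
    (∀ k ∈ List.range q, p < k → S.toList.getD k ' ' = '?') →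
    (S.toList.getD p ' ' = S.toList.getD q ' ' ∨
      ((S.toList.getD p ' ' = 'C' ∨ S.toList.getD p ' ' = 'J') ∧
       (S.toList.getD q ' ' = 'C' ∨ S.toList.getD q ' ' = 'J')))
instance (X : Int) (Y : Int) (S : String) : Decidable (Pre_jamal X Y S) := by
  unfold Pre_jamal; infer_instance

def pvWitness_jamal : Int × Int × String := (3, 5, "CJ?C?")

def Spec_jamal (X : Int) (Y : Int) (S : String) (out : Int) : Prop := out = jamal_alt X Y S
instance (X : Int) (Y : Int) (S : String) (out : Int) : Decidable (Spec_jamal X Y S out) := by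
  unfold Spec_jamal; infer_instance

-- ===== CLAIM (what is proved, stated in full; the proofs are below) =====
def Claim_equal_jamal : Prop := ∀ (X : Int) (Y : Int) (S : String),
  Dom_jamal X Y S → Pre_jamal X Y S → Spec_jamal X Y S (jamal X Y S)

-- ===== LEMMAS AND PROOFS =====

-- recursive form of B's pair sum
def pairSum (X : Int) (Y : Int) : List Char → Int
  | a :: b :: r => pairCostB X Y a b + pairSum X Y (b :: r)
  | _ => 0

theorem pairSum_nil (X Y : Int) : pairSum X Y [] = 0 := rfl
theorem pairSum_single (X Y : Int) (a : Char) : pairSum X Y [a] = 0 := rfl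
theorem pairSum_cons_cons (X Y : Int) (a b : Char) (r : List Char) :
    pairSum X Y (a :: b :: r) = pairCostB X Y a b + pairSum X Y (b :: r) := rfl

theorem foldl_zip_eq_pairSum (X Y : Int) :
    ∀ (t : List Char) (c : Int),
      (t.zip t.tail).foldl (fun acc p => acc + pairCostB X Y p.1 p.2) c = c + pairSum X Y t := by
  intro t
  induction t with
  | nil => intro c; simp [pairSum]
  | cons a r ih =>
    intro c
    cases r with
    | nil => simp [pairSum]
    | cons b s =>
      simp only [List.tail_cons, List.zip_cons_cons, List.foldl_cons]
      have := ih (c + pairCostB X Y a b)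
      simp only [List.tail_cons] at this
      rw [this, pairSum_cons_cons]
      ring

-- dropping a prefix at an in-range index exposes its head
theorem drop_cons_getD (l : List Char) (i : Nat) (hi : i < l.length) :
    l.drop i = l.getD i ' ' :: l.drop (i + 1) := by
  rw [List.getD_eq_getElem l ' ' hi]
  exact List.drop_eq_getElem_cons hi

-- a block of '?' contributes nothing to the filtered list
theorem filter_drop_allq (l : List Char) (i q : Nat) (hle : i ≤ q) (hq : q ≤ l.length)
    (hall : ∀ k, i ≤ k → k < q → l.getD k ' ' = '?') :
    (l.drop i).filter (fun c => c != '?') = (l.drop q).filter (fun c => c != '?') := by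
  rcases Nat.eq_or_lt_of_le hle with rfl | hlt
  · rfl
  · have hi : i < l.length := by omega
    rw [drop_cons_getD l i hi, hall i (Nat.le_refl i) hlt]
    have step : (('?' :: l.drop (i + 1)).filter (fun c => c != '?'))
        = (l.drop (i + 1)).filter (fun c => c != '?') := by simp
    rw [step]
    exact filter_drop_allq l (i + 1) q hlt hq (fun k h1 h2 => hall k (by omega) h2)
termination_by q - i

-- the value A adds at an interior '?' run equals B's pair cost, given Pre's guarantee
theorem cost_eq (X Y : Int) (a b : Char)
    (hab : a = b ∨ ((a = 'C' ∨ a = 'J') ∧ (b = 'C' ∨ b = 'J'))) :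
    (if a = b then (0 : Int)
     else (match (if a = 'C' then some X else if a = 'J' then some Y else none),
                 (if b = 'J' then some X else if b = 'C' then some Y else none) with
           | some u, some v => min u v
           | _, _ => 0)) = pairCostB X Y a b := by
  by_cases h : a = b
  · subst h
    rw [if_pos rfl]
    unfold pairCostB
    split_ifs with h1 h2
    · exact absurd (h1.1 ▸ h1.2) (by decide)
    · exact absurd (h2.1 ▸ h2.2) (by decide)
    · rfl
  · rcases hab with rfl | ⟨ha, hb⟩
    · exact absurd rfl h
    · rcases ha with rfl | rfl <;> rcases hb with rfl | rfl
      · exact absurd rfl h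
      · simp [pairCostB]
      · simp [pairCostB]
      · exact absurd rfl h

-- the cost still owed to the pair (l[i-1], first kept letter of the suffix) when the suffix starts with '?'
def bridge (X : Int) (Y : Int) (l : List Char) (i : Nat) : Int :=
  if i ≠ 0 ∧ (l.drop i).head? = some '?' then
    match ((l.drop i).filter (fun c => c != '?')).head? with
    | some b => pairCostB X Y (l.getD (i - 1) ' ') b
    | none => 0
  else 0

-- full characterisation of the inner while loop
theorem innerJ_spec (l : List Char) (j : Nat) (hj : j < l.length) :
    j ≤ innerJ l l.length j ∧ innerJ l l.length j < l.length ∧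
    (∀ k, j ≤ k → k < innerJ l l.length j → l.getD k ' ' = '?') ∧
    (l.getD (innerJ l l.length j) ' ' ≠ '?' ∨ innerJ l l.length j = l.length - 1) := by
  rw [innerJ]
  split
  case isTrue h =>
    have hj1 : j + 1 < l.length := by omega
    have IH := innerJ_spec l (j + 1) hj1
    refine ⟨by omega, IH.2.1, ?_, IH.2.2.2⟩
    intro k hk1 hk2
    rcases Nat.eq_or_lt_of_le hk1 with rfl | h'
    · exact h.1
    · exact IH.2.2.1 k h' hk2
  case isFalse h =>
    refine ⟨Nat.le_refl j, hj, fun k h1 h2 => absurd (Nat.lt_of_le_of_lt h1 h2) (Nat.lt_irrefl j), ?_⟩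
    by_cases hq : l.getD j ' ' = '?'
    · right
      have : ¬ j < l.length - 1 := fun hlt => h ⟨hq, hlt⟩
      omega
    · left; exact hq
termination_by l.length - j
decreasing_by omega

-- the loop invariant: from position i with accumulator ans, A returns ans plus the pair-cost sum of
-- the kept letters of the suffix, plus the bridge cost owed across a '?' run starting at i
theorem main_invariant (X Y : Int) (l : List Char)
    (hpre : ∀ p < l.length, ∀ q < l.length,
      p + 1 < q → l.getD p ' ' ≠ '?' → l.getD q ' ' ≠ '?' →
      (∀ k < q, p < k → l.getD k ' ' = '?') →
      (l.getD p ' ' = l.getD q ' ' ∨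
        ((l.getD p ' ' = 'C' ∨ l.getD p ' ' = 'J') ∧
         (l.getD q ' ' = 'C' ∨ l.getD q ' ' = 'J'))))
    (i : Nat) (ans : Int) (hi : i ≤ l.length)
    (hprev : i ≠ 0 → l.getD i ' ' = '?' → l.getD (i - 1) ' ' ≠ '?') :
      loopA X Y l l.length i ans
        = ans + pairSum X Y ((l.drop i).filter (fun c => c != '?')) + bridge X Y l i := by
  rw [loopA]
  by_cases hIN : i < l.length
  case neg =>
    rw [dif_neg hIN]
    have hieq : i = l.length := by omega
    subst hieq
    rw [List.drop_length]
    unfold bridge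
    rw [if_neg (fun h => by simpa using h.2)]
    rw [List.filter_nil, pairSum_nil]
    ring
  case pos =>
    rw [dif_pos hIN]
    dsimp only
    by_cases hs : l.getD i ' ' = '?'
    case neg =>
      -- fixed character at position i
      rw [if_neg hs]
      have hprev1 : i + 1 ≠ 0 → l.getD (i + 1) ' ' = '?' → l.getD (i + 1 - 1) ' ' ≠ '?' := by
        intro _ _
        simpa using hs
      have hBi : bridge X Y l i = 0 := by
        unfold bridge
        rw [drop_cons_getD l i hIN]
        exact if_neg (fun h => hs (by simpa using h.2))
      rw [main_invariant X Y l hpre (i + 1) _ (by omega) hprev1]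
      by_cases h1 : i + 1 < l.length
      case neg =>
        have he : i + 1 = l.length := by omega
        have hans : (if i < l.length - 1 then
            (if l.getD i ' ' = 'C' ∧ l.getD (i + 1) ' ' = 'J' then ans + X
             else if l.getD i ' ' = 'J' ∧ l.getD (i + 1) ' ' = 'C' then ans + Y
             else ans) else ans) = ans := by
          rw [if_neg (by omega)]
        have hf1 : (l.drop (i + 1)).filter (fun c => c != '?') = [] := by
          rw [he, List.drop_length]
          rfl
        have hB1 : bridge X Y l (i + 1) = 0 := by
          unfold bridge
          rw [he, List.drop_length]
          exact if_neg (fun h => by simpa using h.2)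
        have hfi : (l.drop i).filter (fun c => c != '?') = [l.getD i ' '] := by
          rw [drop_cons_getD l i hIN, he, List.drop_length,
            List.filter_cons_of_pos (by simpa using hs)]
          rfl
        rw [hans, hf1, hB1, hfi, hBi, pairSum_nil, pairSum_single]
      case pos =>
        by_cases hc2 : l.getD (i + 1) ' ' = '?'
        case pos =>
          have hans : (if i < l.length - 1 then
              (if l.getD i ' ' = 'C' ∧ l.getD (i + 1) ' ' = 'J' then ans + X
               else if l.getD i ' ' = 'J' ∧ l.getD (i + 1) ' ' = 'C' then ans + Y
               else ans) else ans) = ans := by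
            rw [if_pos (by omega), hc2]
            simp
          have hfi : (l.drop i).filter (fun c => c != '?')
              = l.getD i ' ' :: (l.drop (i + 1)).filter (fun c => c != '?') := by
            rw [drop_cons_getD l i hIN, List.filter_cons_of_pos (by simpa using hs)]
          have hcond : i + 1 ≠ 0 ∧ (l.drop (i + 1)).head? = some '?' :=
            ⟨by omega, by rw [drop_cons_getD l (i + 1) h1, List.head?_cons, hc2]⟩
          rcases hf : (l.drop (i + 1)).filter (fun c => c != '?') with _ | ⟨b, t2⟩
          · have hB1 : bridge X Y l (i + 1) = 0 := by
              unfold bridge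
              rw [if_pos hcond, hf]
              rfl
            rw [hans, hB1, hfi, hf, pairSum_nil, pairSum_single, hBi]
          · have hB1 : bridge X Y l (i + 1) = pairCostB X Y (l.getD i ' ') b := by
              unfold bridge
              rw [if_pos hcond, hf]
              rfl
            rw [hans, hB1, hfi, hf, pairSum_cons_cons, hBi]
            ring
        case neg =>
          have hans : (if i < l.length - 1 then
              (if l.getD i ' ' = 'C' ∧ l.getD (i + 1) ' ' = 'J' then ans + X
               else if l.getD i ' ' = 'J' ∧ l.getD (i + 1) ' ' = 'C' then ans + Y
               else ans) else ans) = ans + pairCostB X Y (l.getD i ' ') (l.getD (i + 1) ' ') := by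
            rw [if_pos (by omega)]
            unfold pairCostB
            split_ifs <;> ring
          have hfi1 : (l.drop (i + 1)).filter (fun c => c != '?')
              = l.getD (i + 1) ' ' :: (l.drop (i + 2)).filter (fun c => c != '?') := by
            rw [drop_cons_getD l (i + 1) h1, List.filter_cons_of_pos (by simpa using hc2)]
          have hfi : (l.drop i).filter (fun c => c != '?')
              = l.getD i ' ' :: l.getD (i + 1) ' ' :: (l.drop (i + 2)).filter (fun c => c != '?') := by
            rw [drop_cons_getD l i hIN, List.filter_cons_of_pos (by simpa using hs), hfi1]
          have hB1 : bridge X Y l (i + 1) = 0 := by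
            unfold bridge
            rw [drop_cons_getD l (i + 1) h1]
            exact if_neg (fun h => hc2 (by simpa using h.2))
          rw [hans, hB1, hfi, hfi1, pairSum_cons_cons, hBi]
          ring
    case pos =>
      -- a '?' run starts at position i
      rw [if_pos hs]
      obtain ⟨hj0ge, hj0lt, hallq, hlast⟩ := innerJ_spec l i hIN
      by_cases hq : l.getD (innerJ l l.length i) ' ' = '?'
      case pos =>
        -- the run reaches the end of the string: nothing is charged and the loop exits
        have hj0 : innerJ l l.length i = l.length - 1 := by
          rcases hlast with h | h
          · exact absurd hq h
          · exact h
        have hallq' : ∀ k, i ≤ k → k < l.length → l.getD k ' ' = '?' := by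
          intro k h1 h2
          rcases Nat.lt_or_ge k (innerJ l l.length i) with h3 | h3
          · exact hallq k h1 h3
          · have hk : k = innerJ l l.length i := by omega
            rw [hk]; exact hq
        have hfe : (l.drop i).filter (fun c => c != '?') = [] := by
          rw [filter_drop_allq l i l.length (by omega) (le_refl _) hallq', List.drop_length]
          rfl
        have hj : (if l.getD (innerJ l l.length i) ' ' = '?' ∧ innerJ l l.length i = l.length - 1
                      ∧ i ≠ innerJ l l.length i then innerJ l l.length i
                   else if i ≠ innerJ l l.length i then innerJ l l.length i - 1
                   else innerJ l l.length i) = l.length - 1 := by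
          by_cases hij : i = innerJ l l.length i
          · rw [if_neg (by tauto), if_neg (by tauto)]
            omega
          · rw [if_pos ⟨hq, hj0, hij⟩]
            omega
        rw [hj]
        rw [if_neg (show ¬(i ≠ 0 ∧ l.length - 1 ≠ l.length - 1) by omega)]
        have hlen1 : l.length - 1 + 1 = l.length := by omega
        rw [hlen1]
        have hprevN : l.length ≠ 0 → l.getD l.length ' ' = '?' → l.getD (l.length - 1) ' ' ≠ '?' := by
          intro _ habs
          rw [List.getD_eq_default _ _ (le_refl _)] at habs
          exact absurd habs (by decide)
        rw [main_invariant X Y l hpre l.length ans (le_refl _) hprevN]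
        have hfN : (l.drop l.length).filter (fun c => c != '?') = [] := by
          rw [List.drop_length]
          rfl
        have hBN : bridge X Y l l.length = 0 := by
          unfold bridge
          rw [List.drop_length]
          exact if_neg (fun h => by simpa using h.2)
        have hBi : bridge X Y l i = 0 := by
          unfold bridge
          rw [hfe]
          split <;> rfl
        rw [hfN, hfe, hBN, hBi, pairSum_nil]
      case neg =>
        -- the run is followed by a fixed character at position j0 = innerJ
        have hne : i ≠ innerJ l l.length i := fun e => hq (e ▸ hs)
        have hilt : i < innerJ l l.length i := by omega
        have hj : (if l.getD (innerJ l l.length i) ' ' = '?' ∧ innerJ l l.length i = l.length - 1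
                      ∧ i ≠ innerJ l l.length i then innerJ l l.length i
                   else if i ≠ innerJ l l.length i then innerJ l l.length i - 1
                   else innerJ l l.length i) = innerJ l l.length i - 1 := by
          rw [if_neg (by tauto), if_pos hne]
        rw [hj]
        have hj1 : innerJ l l.length i - 1 + 1 = innerJ l l.length i := by omega
        rw [hj1]
        have hjne : innerJ l l.length i - 1 ≠ l.length - 1 := by omega
        have hprevJ : innerJ l l.length i ≠ 0 → l.getD (innerJ l l.length i) ' ' = '?' →
            l.getD (innerJ l l.length i - 1) ' ' ≠ '?' := fun _ h => absurd h hq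
        have hPij : (l.drop i).filter (fun c => c != '?')
            = (l.drop (innerJ l l.length i)).filter (fun c => c != '?') :=
          filter_drop_allq l i (innerJ l l.length i) (by omega) (by omega) hallq
        have hfj : (l.drop (innerJ l l.length i)).filter (fun c => c != '?')
            = l.getD (innerJ l l.length i) ' '
              :: (l.drop (innerJ l l.length i + 1)).filter (fun c => c != '?') := by
          rw [drop_cons_getD l (innerJ l l.length i) hj0lt,
            List.filter_cons_of_pos (by simpa using hq)]
        have hBj : bridge X Y l (innerJ l l.length i) = 0 := by
          unfold bridge
          rw [drop_cons_getD l (innerJ l l.length i) hj0lt]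
          exact if_neg (fun h => hq (by simpa using h.2))
        by_cases hi0 : i = 0
        case pos =>
          rw [if_neg (fun h => h.1 hi0)]
          rw [main_invariant X Y l hpre (innerJ l l.length i) ans (by omega) hprevJ]
          have hBi : bridge X Y l i = 0 := by
            unfold bridge
            rw [if_neg (fun h => h.1 hi0)]
          rw [hPij, hBj, hBi]
        case neg =>
          have haq : l.getD (i - 1) ' ' ≠ '?' := hprev hi0 hs
          have hab := hpre (i - 1) (by omega) (innerJ l l.length i) hj0lt (by omega) haq hq
            (fun k hk hpk => hallq k (by omega) hk)
          have hans : (if i ≠ 0 ∧ innerJ l l.length i - 1 ≠ l.length - 1 then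
              (if l.getD (i - 1) ' ' = l.getD (innerJ l l.length i) ' ' then ans
               else ans + (match (if l.getD (i - 1) ' ' = 'C' then some X
                                  else if l.getD (i - 1) ' ' = 'J' then some Y else none),
                                 (if l.getD (innerJ l l.length i) ' ' = 'J' then some X
                                  else if l.getD (innerJ l l.length i) ' ' = 'C' then some Y
                                  else none) with
                           | some u, some v => min u v
                           | _, _ => 0))
              else ans)
              = ans + pairCostB X Y (l.getD (i - 1) ' ') (l.getD (innerJ l l.length i) ' ') := by
            rw [if_pos ⟨hi0, hjne⟩]
            rw [← cost_eq X Y _ _ hab]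
            split_ifs <;> ring
          rw [hans]
          rw [main_invariant X Y l hpre (innerJ l l.length i) _ (by omega) hprevJ]
          have hBi : bridge X Y l i
              = pairCostB X Y (l.getD (i - 1) ' ') (l.getD (innerJ l l.length i) ' ') := by
            unfold bridge
            rw [if_pos ⟨hi0, by rw [drop_cons_getD l i hIN, List.head?_cons, hs]⟩]
            rw [hPij, hfj]
            rfl
          rw [hPij, hfj, hBj, hBi]
          ring
termination_by l.length - i
decreasing_by all_goals omega

-- ===== VERDICT (by name: the statement is the Claim_ definition above) =====
theorem jamal_spec : Claim_equal_jamal := by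
  intro X Y S _hDom hpre
  unfold Spec_jamal jamal jamal_alt
  rw [foldl_zip_eq_pairSum]
  have hpre' : ∀ p < S.toList.length, ∀ q < S.toList.length,
      p + 1 < q → S.toList.getD p ' ' ≠ '?' → S.toList.getD q ' ' ≠ '?' →
      (∀ k < q, p < k → S.toList.getD k ' ' = '?') →
      (S.toList.getD p ' ' = S.toList.getD q ' ' ∨
        ((S.toList.getD p ' ' = 'C' ∨ S.toList.getD p ' ' = 'J') ∧
         (S.toList.getD q ' ' = 'C' ∨ S.toList.getD q ' ' = 'J'))) := by
    intro p hp q hq h1 h2 h3 h4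
    exact hpre p (List.mem_range.mpr hp) q (List.mem_range.mpr hq) h1 h2 h3
      (fun k hk hpk => h4 k (List.mem_range.mp hk) hpk)
  have h := main_invariant X Y S.toList hpre' 0 0 (Nat.zero_le _)
    (fun h0 _ => absurd rfl h0)
  simp only [List.drop_zero] at h
  rw [h]
  simp [bridge]
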